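-- pv_equiv track=rewrite | github.com/preetimaan/mail-mind | backend/app/email_batch_analysis.py | _categorize_emails
-- ===== SOURCE A (Python) =====
-- from typing import Dict, List
--
-- def _categorize_emails(emails: List[Dict]) -> Dict:
--     categories = {
--         "notifications": 0,
--         "newsletters": 0,
--         "social": 0,
--         "shopping": 0,
--         "work": 0,
--         "personal": 0,
--         "other": 0,
--     }
--
--     notification_keywords = [
--         "notification",
--         "alert",
--         "reminder",
--         "confirm",
--         "receipt",
--     ]
--     newsletter_keywords = [
--         "newsletter",
--         "digest",
--         "weekly",
--         "monthly",
--         "unsubscribe",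
--     ]
--     social_keywords = [
--         "facebook",
--         "twitter",
--         "linkedin",
--         "instagram",
--         "social",
--     ]
--     shopping_keywords = [
--         "order",
--         "purchase",
--         "shipping",
--         "delivery",
--         "amazon",
--         "ebay",
--     ]
--     work_keywords = ["meeting", "calendar", "team", "project", "deadline"]
--
--     for email in emails:
--         subject = (email.get("subject", "") or "").lower()
--         sender = (email.get("sender_email", "") or "").lower()
--
--         categorized = False
--
--         if any(kw in subject for kw in notification_keywords):
--             categories["notifications"] += 1
--             categorized = True
--         elif any(kw in subject or kw in sender for kw in newsletter_keywords):
--             categories["newsletters"] += 1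
--             categorized = True
--         elif any(kw in sender for kw in social_keywords):
--             categories["social"] += 1
--             categorized = True
--         elif any(kw in subject or kw in sender for kw in shopping_keywords):
--             categories["shopping"] += 1
--             categorized = True
--         elif any(kw in subject for kw in work_keywords):
--             categories["work"] += 1
--             categorized = True
--         elif "@" in sender and not any(
--             kw in sender for kw in ["noreply", "no-reply", "donotreply"]
--         ):
--             categories["personal"] += 1
--             categorized = True
--
--         if not categorized:
--             categories["other"] += 1
--
--     return categories
-- ===== SOURCE B (Python) =====
-- from typing import Dict, List
--
-- _NOTIF = ["notification", "alert", "reminder", "confirm", "receipt"]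
-- _NEWS = ["newsletter", "digest", "weekly", "monthly", "unsubscribe"]
-- _SOCIAL = ["facebook", "twitter", "linkedin", "instagram", "social"]
-- _SHOP = ["order", "purchase", "shipping", "delivery", "amazon", "ebay"]
-- _WORK = ["meeting", "calendar", "team", "project", "deadline"]
-- _NOREPLY = ["noreply", "no-reply", "donotreply"]
--
--
-- def _has(text, kws):
--     return any(k in text for k in kws)
--
--
-- _STAGES = [
--     ("notifications", lambda s, f: _has(s, _NOTIF)),
--     ("newsletters", lambda s, f: _has(s, _NEWS) or _has(f, _NEWS)),
--     ("social", lambda s, f: _has(f, _SOCIAL)),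
--     ("shopping", lambda s, f: _has(s, _SHOP) or _has(f, _SHOP)),
--     ("work", lambda s, f: _has(s, _WORK)),
--     ("personal", lambda s, f: "@" in f and not _has(f, _NOREPLY)),
-- ]
--
--
-- def _categorize_emails(emails: List[Dict]) -> Dict:
--     # Sieve, category-major: each stage counts the emails it captures and
--     # passes the rest on; whatever survives all stages is "other".
--     remaining = [((e.get("subject", "") or "").lower(),
--                   (e.get("sender_email", "") or "").lower()) for e in emails]
--     result = {}
--     for name, pred in _STAGES:
--         result[name] = sum(1 for x in remaining if pred(*x))
--         remaining = [x for x in remaining if not pred(*x)]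
--     result["other"] = len(remaining)
--     return result
-- ===== Notes on version B (the rewrite author's own statement) =====
-- stated objective: simpler
-- what changed: A is email-major (one pass over emails, a seven-branch if/elif with a categorized flag updating a counter dict); B is category-major (a sieve): each category in turn counts the not-yet-captured emails its predicate matches and filters them out, and whatever survives all stages is 'other'.
import Mathlib
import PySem

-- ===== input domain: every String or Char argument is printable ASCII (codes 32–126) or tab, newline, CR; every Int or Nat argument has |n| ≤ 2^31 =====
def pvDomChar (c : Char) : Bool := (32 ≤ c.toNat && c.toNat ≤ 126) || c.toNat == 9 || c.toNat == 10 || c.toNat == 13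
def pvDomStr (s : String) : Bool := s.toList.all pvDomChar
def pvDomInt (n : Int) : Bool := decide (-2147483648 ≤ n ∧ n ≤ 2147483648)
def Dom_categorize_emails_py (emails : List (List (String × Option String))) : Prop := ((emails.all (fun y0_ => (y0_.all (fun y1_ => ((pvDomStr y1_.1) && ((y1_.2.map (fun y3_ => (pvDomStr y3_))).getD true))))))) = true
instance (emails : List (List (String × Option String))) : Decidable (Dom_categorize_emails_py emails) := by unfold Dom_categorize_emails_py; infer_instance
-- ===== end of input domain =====

-- B replaces A's email-major if/elif chain by a category-major sieve: one counting
-- pass per category over the emails not yet captured; objective 'simpler'.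

-- ===== PORT A =====
-- shared field extraction: (email.get(k, "") or "").lower()  (missing key or None value -> "")
def pvField (email : List (String × Option String)) (k : String) : String :=
  PySem.Str.lower (match (PySem.Dict.mk email).get? k with
    | none => ""
    | some v => v.getD "")

def categorize_emails_py (emails : List (List (String × Option String))) : List (String × Int) :=
  let categories : PySem.Dict String Int := PySem.Dict.ofList
    [("notifications", 0), ("newsletters", 0), ("social", 0), ("shopping", 0),
     ("work", 0), ("personal", 0), ("other", 0)]
  let notification_keywords := ["notification", "alert", "reminder", "confirm", "receipt"]
  let newsletter_keywords := ["newsletter", "digest", "weekly", "monthly", "unsubscribe"]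
  let social_keywords := ["facebook", "twitter", "linkedin", "instagram", "social"]
  let shopping_keywords := ["order", "purchase", "shipping", "delivery", "amazon", "ebay"]
  let work_keywords := ["meeting", "calendar", "team", "project", "deadline"]
  (emails.foldl (fun cats email =>
    let subject := pvField email "subject"
    let sender := pvField email "sender_email"
    if notification_keywords.any (fun kw => PySem.Str.isIn kw subject) then
      cats.modify "notifications" 0 (· + 1)
    else if newsletter_keywords.any (fun kw => PySem.Str.isIn kw subject || PySem.Str.isIn kw sender) then
      cats.modify "newsletters" 0 (· + 1)
    else if social_keywords.any (fun kw => PySem.Str.isIn kw sender) then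
      cats.modify "social" 0 (· + 1)
    else if shopping_keywords.any (fun kw => PySem.Str.isIn kw subject || PySem.Str.isIn kw sender) then
      cats.modify "shopping" 0 (· + 1)
    else if work_keywords.any (fun kw => PySem.Str.isIn kw subject) then
      cats.modify "work" 0 (· + 1)
    else if PySem.Str.isIn "@" sender
            && !(["noreply", "no-reply", "donotreply"].any (fun kw => PySem.Str.isIn kw sender)) then
      cats.modify "personal" 0 (· + 1)
    else
      cats.modify "other" 0 (· + 1)) categories).items

-- ===== PORT B =====
def pvHas (text : String) (kws : List String) : Bool :=
  kws.any (fun k => PySem.Str.isIn k text)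

-- the ordered sieve stages: (category name, predicate on (subject, sender))
def pvStages : List (String × (String × String → Bool)) :=
  [("notifications", fun x => pvHas x.1 ["notification", "alert", "reminder", "confirm", "receipt"]),
   ("newsletters", fun x => pvHas x.1 ["newsletter", "digest", "weekly", "monthly", "unsubscribe"]
                            || pvHas x.2 ["newsletter", "digest", "weekly", "monthly", "unsubscribe"]),
   ("social", fun x => pvHas x.2 ["facebook", "twitter", "linkedin", "instagram", "social"]),
   ("shopping", fun x => pvHas x.1 ["order", "purchase", "shipping", "delivery", "amazon", "ebay"]
                         || pvHas x.2 ["order", "purchase", "shipping", "delivery", "amazon", "ebay"]),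
   ("work", fun x => pvHas x.1 ["meeting", "calendar", "team", "project", "deadline"]),
   ("personal", fun x => PySem.Str.isIn "@" x.2
                         && !(pvHas x.2 ["noreply", "no-reply", "donotreply"]))]

def categorize_emails_py_alt (emails : List (List (String × Option String))) : List (String × Int) :=
  let remaining := emails.map (fun e => (pvField e "subject", pvField e "sender_email"))
  let st := pvStages.foldl
    (fun (acc : PySem.Dict String Int × List (String × String)) stage =>
      (acc.1.insert stage.1 ((acc.2.countP (fun x => stage.2 x) : Int)),
       acc.2.filter (fun x => !stage.2 x)))
    (PySem.Dict.empty, remaining)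
  (st.1.insert "other" ((st.2.length : Int))).items

-- ===== PRECONDITION & SPEC =====
def Spec_categorize_emails_py (emails : List (List (String × Option String))) (out : List (String × Int)) : Prop := out = categorize_emails_py_alt emails
instance (emails : List (List (String × Option String))) (out : List (String × Int)) : Decidable (Spec_categorize_emails_py emails out) := by unfold Spec_categorize_emails_py; infer_instance

-- ===== CLAIM (what is proved, stated in full; the proofs are below) =====
def Claim_equal_categorize_emails_py : Prop := ∀ (emails : List (List (String × Option String))), Dom_categorize_emails_py emails → Spec_categorize_emails_py emails (categorize_emails_py emails)

-- ===== LEMMAS AND PROOFS =====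

-- classifier used only by the proofs
def pvClsB (b1 b2 b3 b4 b5 b6 : Bool) : String :=
  if b1 then "notifications" else if b2 then "newsletters" else if b3 then "social"
  else if b4 then "shopping" else if b5 then "work" else if b6 then "personal" else "other"

def pvCls (x : String × String) : String :=
  pvClsB (pvHas x.1 ["notification", "alert", "reminder", "confirm", "receipt"])
    (pvHas x.1 ["newsletter", "digest", "weekly", "monthly", "unsubscribe"]
      || pvHas x.2 ["newsletter", "digest", "weekly", "monthly", "unsubscribe"])
    (pvHas x.2 ["facebook", "twitter", "linkedin", "instagram", "social"])
    (pvHas x.1 ["order", "purchase", "shipping", "delivery", "amazon", "ebay"]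
      || pvHas x.2 ["order", "purchase", "shipping", "delivery", "amazon", "ebay"])
    (pvHas x.1 ["meeting", "calendar", "team", "project", "deadline"])
    (PySem.Str.isIn "@" x.2 && !(pvHas x.2 ["noreply", "no-reply", "donotreply"]))

theorem pvB7 : ∀ (c1 n1 n2 s3 h1 h2 w a nr : Bool),
    ((n1 || n2) && !c1) = (pvClsB c1 (n1 || n2) s3 (h1 || h2) w (a && !nr) == "newsletters")
    ∧ (s3 && (!n1 && !n2 && !c1)) = (pvClsB c1 (n1 || n2) s3 (h1 || h2) w (a && !nr) == "social")
    ∧ ((h1 || h2) && (!s3 && (!n1 && !n2 && !c1))) = (pvClsB c1 (n1 || n2) s3 (h1 || h2) w (a && !nr) == "shopping")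
    ∧ (w && (!h1 && !h2 && (!s3 && (!n1 && !n2 && !c1)))) = (pvClsB c1 (n1 || n2) s3 (h1 || h2) w (a && !nr) == "work")
    ∧ (a && !nr && (!w && (!h1 && !h2 && (!s3 && (!n1 && !n2 && !c1))))) = (pvClsB c1 (n1 || n2) s3 (h1 || h2) w (a && !nr) == "personal")
    ∧ ((!a || nr) && (!w && (!h1 && !h2 && (!s3 && (!n1 && !n2 && !c1))))) = (pvClsB c1 (n1 || n2) s3 (h1 || h2) w (a && !nr) == "other")
    ∧ c1 = (pvClsB c1 (n1 || n2) s3 (h1 || h2) w (a && !nr) == "notifications") := by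
  decide

theorem pv_any_or {α : Type} (l : List α) (f g : α → Bool) :
    l.any (fun x => f x || g x) = (l.any f || l.any g) := by
  induction l with
  | nil => simp
  | cons a t ih => cases hf : f a <;> cases hg : g a <;> simp [hf, hg, ih]

def pvKeys : List String :=
  ["notifications", "newsletters", "social", "shopping", "work", "personal", "other"]

theorem pvCls_mem (x : String × String) : pvCls x ∈ pvKeys := by
  unfold pvCls pvClsB pvKeys
  split_ifs <;> simp

theorem pv_step_eq (cats : PySem.Dict String Int) (email : List (String × Option String)) :
    (let subject := pvField email "subject"
     let sender := pvField email "sender_email"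
     if (["notification", "alert", "reminder", "confirm", "receipt"] : List String).any (fun kw => PySem.Str.isIn kw subject) then
       cats.modify "notifications" 0 (· + 1)
     else if (["newsletter", "digest", "weekly", "monthly", "unsubscribe"] : List String).any (fun kw => PySem.Str.isIn kw subject || PySem.Str.isIn kw sender) then
       cats.modify "newsletters" 0 (· + 1)
     else if (["facebook", "twitter", "linkedin", "instagram", "social"] : List String).any (fun kw => PySem.Str.isIn kw sender) then
       cats.modify "social" 0 (· + 1)
     else if (["order", "purchase", "shipping", "delivery", "amazon", "ebay"] : List String).any (fun kw => PySem.Str.isIn kw subject || PySem.Str.isIn kw sender) then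
       cats.modify "shopping" 0 (· + 1)
     else if (["meeting", "calendar", "team", "project", "deadline"] : List String).any (fun kw => PySem.Str.isIn kw subject) then
       cats.modify "work" 0 (· + 1)
     else if PySem.Str.isIn "@" sender
             && !((["noreply", "no-reply", "donotreply"] : List String).any (fun kw => PySem.Str.isIn kw sender)) then
       cats.modify "personal" 0 (· + 1)
     else
       cats.modify "other" 0 (· + 1))
    = cats.modify (pvCls (pvField email "subject", pvField email "sender_email")) 0 (· + 1) := by
  simp only [pvCls, pvClsB, pvHas]
  rw [pv_any_or, pv_any_or]
  split_ifs <;> rfl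

theorem categorize_A_items (emails : List (List (String × Option String))) :
    categorize_emails_py emails
    = pvKeys.map (fun k =>
        (k, ((emails.map (fun e => (pvField e "subject", pvField e "sender_email"))).countP
              (fun x => pvCls x == k) : Int))) := by
  unfold categorize_emails_py
  simp only []
  rw [show (fun (cats : PySem.Dict String Int) (email : List (String × Option String)) =>
      let subject := pvField email "subject"
      let sender := pvField email "sender_email"
      if (["notification", "alert", "reminder", "confirm", "receipt"] : List String).any (fun kw => PySem.Str.isIn kw subject) then
        cats.modify "notifications" 0 (· + 1)
      else if (["newsletter", "digest", "weekly", "monthly", "unsubscribe"] : List String).any (fun kw => PySem.Str.isIn kw subject || PySem.Str.isIn kw sender) then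
        cats.modify "newsletters" 0 (· + 1)
      else if (["facebook", "twitter", "linkedin", "instagram", "social"] : List String).any (fun kw => PySem.Str.isIn kw sender) then
        cats.modify "social" 0 (· + 1)
      else if (["order", "purchase", "shipping", "delivery", "amazon", "ebay"] : List String).any (fun kw => PySem.Str.isIn kw subject || PySem.Str.isIn kw sender) then
        cats.modify "shopping" 0 (· + 1)
      else if (["meeting", "calendar", "team", "project", "deadline"] : List String).any (fun kw => PySem.Str.isIn kw subject) then
        cats.modify "work" 0 (· + 1)
      else if PySem.Str.isIn "@" sender
              && !((["noreply", "no-reply", "donotreply"] : List String).any (fun kw => PySem.Str.isIn kw sender)) then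
        cats.modify "personal" 0 (· + 1)
      else
        cats.modify "other" 0 (· + 1))
    = (fun (cats : PySem.Dict String Int) email =>
        cats.modify (pvCls (pvField email "subject", pvField email "sender_email")) 0 (· + 1))
    from funext fun cats => funext fun email => pv_step_eq cats email]
  rw [← List.foldl_map (f := fun e => pvCls (pvField e "subject", pvField e "sender_email"))
        (g := fun (cats : PySem.Dict String Int) k => cats.modify k 0 (· + 1))]
  set key := fun (e : List (String × Option String)) => pvCls (pvField e "subject", pvField e "sender_email") with hkey
  set L := emails.map key with hL
  set d0 : PySem.Dict String Int := PySem.Dict.ofList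
    [("notifications", 0), ("newsletters", 0), ("social", 0), ("shopping", 0),
     ("work", 0), ("personal", 0), ("other", 0)] with hd0
  have hfold := PySem.Dict.keys_foldl_modify L (0 : Int) (fun _ _ => fun v => v + 1) d0
  have hkeys : (L.foldl (fun d x => d.modify x 0 (· + 1)) d0).keys = pvKeys := by
    rw [hfold]
    have hk0 : d0.keys = pvKeys := by decide
    rw [hk0, PySem.Set.update_eq_append_filter]
    have hnil : (PySem.Set.ofList L).filter (fun y => !PySem.Set.contains pvKeys y) = [] := by
      apply List.filter_eq_nil_iff.mpr
      intro y hy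
      have hyL : y ∈ L := (PySem.Set.mem_ofList _ _).mp hy
      obtain ⟨e, _, rfl⟩ := List.mem_map.mp hyL
      simp only [Bool.not_eq_eq_eq_not, Bool.not_true, PySem.Set.contains_eq_listContains,
        List.contains_eq_mem, decide_eq_false_iff_not]
      exact fun h => h (pvCls_mem _)
    rw [hnil, List.append_nil]
  have hnd : (L.foldl (fun d x => d.modify x 0 (· + 1)) d0).keys.Nodup := by
    rw [hkeys]; decide
  rw [PySem.Dict.items_eq_map_keys _ hnd 0, hkeys]
  apply List.map_congr_left
  intro k hk
  rw [PySem.Dict.getD_foldl_modify_add_one L d0 k]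
  have hz : d0.getD k 0 = 0 := by
    fin_cases hk <;> decide
  rw [hz, zero_add, List.count_eq_countP, hL, List.countP_map, List.countP_map]
  rfl


set_option maxHeartbeats 2000000 in
theorem categorize_B_items (emails : List (List (String × Option String))) :
    categorize_emails_py_alt emails
    = pvKeys.map (fun k =>
        (k, ((emails.map (fun e => (pvField e "subject", pvField e "sender_email"))).countP
              (fun x => pvCls x == k) : Int))) := by
  simp only [categorize_emails_py_alt, pvStages, List.foldl_cons, List.foldl_nil]
  simp [PySem.Dict.insert, PySem.Dict.empty, PySem.Dict.contains,
    List.countP_filter, pvKeys]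
  refine ⟨?_, ?_, ?_, ?_, ?_, ?_, ?_⟩ <;>
    [skip; skip; skip; skip; skip; skip; rw [← List.countP_eq_length_filter, List.countP_map]] <;>
    (apply List.countP_congr; intro e _; simp only [Function.comp_apply, pvCls]) <;>
    [exact iff_of_eq (congrArg (· = true) ((pvB7 _ _ _ _ _ _ _ _ _).2.2.2.2.2.2));
     exact iff_of_eq (congrArg (· = true) ((pvB7 _ _ _ _ _ _ _ _ _).1));
     exact iff_of_eq (congrArg (· = true) ((pvB7 _ _ _ _ _ _ _ _ _).2.1));
     exact iff_of_eq (congrArg (· = true) ((pvB7 _ _ _ _ _ _ _ _ _).2.2.1));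
     exact iff_of_eq (congrArg (· = true) ((pvB7 _ _ _ _ _ _ _ _ _).2.2.2.1));
     exact iff_of_eq (congrArg (· = true) ((pvB7 _ _ _ _ _ _ _ _ _).2.2.2.2.1));
     exact iff_of_eq (congrArg (· = true) ((pvB7 _ _ _ _ _ _ _ _ _).2.2.2.2.2.1))]


theorem categorize_emails_py_eq_alt (emails : List (List (String × Option String))) :
    categorize_emails_py emails = categorize_emails_py_alt emails := by
  rw [categorize_A_items, categorize_B_items]

-- ===== VERDICT (by name: the statement is the Claim_ definition above) =====
theorem categorize_emails_py_spec : Claim_equal_categorize_emails_py := by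
  intro emails _
  exact categorize_emails_py_eq_alt emails
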